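-- pv_equiv track=rewrite | github.com/adiantek/FurniFab | algo/F2,rj,pmtn,Cmax/vns.py | C_max
-- ===== SOURCE A (Python) =====
-- def C_max(tasks):
--     max_order = 0
--     current_order=0
--     for i in range (len(tasks)):
--         current_order = current_order + tasks[i][1]
--         max_order = max(max_order, current_order)
--         max_order = max_order + tasks[i][2]
--     return max_order
-- ===== SOURCE B (Python) =====
-- def C_max(tasks):
--     # suffix-sum table of the [2] fields, then one forward prefix scan of the [1] fields
--     total = 0
--     suffix = []
--     for t in reversed(tasks):
--         total += t[2]
--         suffix.append(total)
--     suffix.reverse()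
--     best = total
--     pref = 0
--     for t, s in zip(tasks, suffix):
--         pref += t[1]
--         best = max(best, pref + s)
--     return best
-- ===== Notes on version B (the rewrite author's own statement) =====
-- stated objective: alternative
-- what changed: Replaces A's single in-place max-plus recurrence (running current_order/max_order updated per step) by a two-pass scheme: a reverse pass building a suffix-sum table of the [2] fields, then a forward prefix scan of the [1] fields taking the max of prefix+suffix, seeded with the total [2] sum.
import Mathlib
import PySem

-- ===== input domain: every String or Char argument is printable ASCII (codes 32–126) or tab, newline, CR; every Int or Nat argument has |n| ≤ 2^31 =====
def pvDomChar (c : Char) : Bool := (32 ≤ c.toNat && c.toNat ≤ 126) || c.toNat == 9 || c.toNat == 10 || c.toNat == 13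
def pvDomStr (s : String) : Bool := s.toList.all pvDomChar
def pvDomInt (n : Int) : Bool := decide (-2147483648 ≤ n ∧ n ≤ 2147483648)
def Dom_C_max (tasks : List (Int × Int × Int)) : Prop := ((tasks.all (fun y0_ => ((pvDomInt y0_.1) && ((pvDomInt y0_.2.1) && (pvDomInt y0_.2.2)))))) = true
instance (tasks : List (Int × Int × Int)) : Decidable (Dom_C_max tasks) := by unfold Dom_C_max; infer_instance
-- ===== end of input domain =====

-- B replaces A's single in-place max-plus recurrence by a suffix-sum table plus a forward
-- prefix-max scan (alternative decomposition, same cost).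


-- ===== PORT A =====
def C_max (tasks : List (Int × Int × Int)) : Int :=
  -- for i in range(len(tasks)): current += tasks[i][1]; max_order = max(max_order, current); max_order += tasks[i][2]
  let st := (PySem.List.pyRange 0 (PySem.List.len tasks) 1).foldl
    (fun (p : Int × Int) i =>
      let t := PySem.List.pyGetD tasks i (0, 0, 0)   -- index always in range
      let current_order := p.2 + t.2.1
      let max_order := max p.1 current_order
      (max_order + t.2.2, current_order)) (0, 0)
  st.1

-- ===== PORT B =====
def C_max_alt (tasks : List (Int × Int × Int)) : Int :=
  -- reverse pass: running total of t[2], appended; then suffix.reverse()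
  let p := tasks.reverse.foldl
    (fun (acc : Int × List Int) t =>
      let total := acc.1 + t.2.2
      (total, acc.2 ++ [total])) (0, [])
  let total := p.1
  let suffix := p.2.reverse
  -- forward pass: pref += t[1]; best = max(best, pref + s)
  let q := (tasks.zip suffix).foldl
    (fun (acc : Int × Int) ts =>
      let pref := acc.2 + ts.1.2.1
      (max acc.1 (pref + ts.2), pref)) (total, 0)
  q.1

-- ===== PRECONDITION & SPEC =====
def Spec_C_max (tasks : List (Int × Int × Int)) (out : Int) : Prop := out = C_max_alt tasks
instance (tasks : List (Int × Int × Int)) (out : Int) : Decidable (Spec_C_max tasks out) := by unfold Spec_C_max; infer_instance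

-- ===== CLAIM (what is proved, stated in full; the proofs are below) =====
def Claim_equal_C_max : Prop := ∀ (tasks : List (Int × Int × Int)), Dom_C_max tasks → Spec_C_max tasks (C_max tasks)

-- ===== LEMMAS AND PROOFS =====

-- sum of the third components
def pvSumC (ts : List (Int × Int × Int)) : Int := (ts.map (fun t => t.2.2)).sum

-- the suffix-sum table, front to back
def pvSuff (ts : List (Int × Int × Int)) : List Int :=
  match ts with
  | [] => []
  | t :: ts' => (t.2.2 + pvSumC ts') :: pvSuff ts'

-- the reverse pass of B computes (total sum, reversed suffix table)
lemma pvRevPass (ts : List (Int × Int × Int)) :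
    ts.reverse.foldl
      (fun (acc : Int × List Int) t =>
        let total := acc.1 + t.2.2
        (total, acc.2 ++ [total])) (0, []) = (pvSumC ts, (pvSuff ts).reverse) := by
  induction ts with
  | nil => simp [pvSumC, pvSuff]
  | cons t ts ih =>
    simp only [List.reverse_cons, List.foldl_append, ih, List.foldl_cons, List.foldl_nil,
      pvSumC, pvSuff, List.map_cons, List.sum_cons, List.reverse_cons]
    rw [Int.add_comm]

-- A's fold equals B's forward scan, for any accumulator state
lemma pvMain (ts : List (Int × Int × Int)) : ∀ M C : Int,
    (ts.foldl
      (fun (p : Int × Int) t =>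
        (max p.1 (p.2 + t.2.1) + t.2.2, p.2 + t.2.1)) (M, C)).1 =
    ((ts.zip (pvSuff ts)).foldl
      (fun (acc : Int × Int) x =>
        (max acc.1 (acc.2 + x.1.2.1 + x.2), acc.2 + x.1.2.1)) (M + pvSumC ts, C)).1 := by
  induction ts with
  | nil => intro M C; simp [pvSumC]
  | cons t ts ih =>
    intro M C
    simp only [pvSuff, List.zip_cons_cons, List.foldl_cons, pvSumC, List.map_cons,
      List.sum_cons]
    rw [ih]
    congr 2
    · have : max M (C + t.2.1) + t.2.2 + pvSumC ts
          = max (M + (t.2.2 + pvSumC ts)) (C + t.2.1 + (t.2.2 + pvSumC ts)) := by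
        rw [← max_add_add_right, ← max_add_add_right]; ring_nf
      simpa [pvSumC] using this

-- ===== VERDICT (by name: the statement is the Claim_ definition above) =====
theorem C_max_spec : Claim_equal_C_max := by
  intro tasks _
  unfold Spec_C_max C_max C_max_alt
  rw [PySem.List.foldl_pyRange_zero_pyGetD tasks (0, 0, 0)
      (fun (p : Int × Int) t =>
        (max p.1 (p.2 + t.2.1) + t.2.2, p.2 + t.2.1)) (0, 0)]
  simp only [pvRevPass, List.reverse_reverse]
  simpa using pvMain tasks 0 0
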